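-- pv_equiv track=rewrite | github.com/kondanta/study-lib | Taylan/Crypt/python/crpt.py | RightLeftNibble
-- ===== SOURCE A (Python) =====
-- def RightLeftNibble(string):
--     right_nibble = []
--     left_nibble = []
--     string = [string[i:i+8] for i in range(0, len(string), 8)]
--     counter = 0
--     for item in string:
--         if counter % 2 == 0:
--             right_nibble.append(item)
--             counter += 1
--         else:
--             left_nibble.append(item)
--             counter += 1
--     return right_nibble, left_nibble
-- ===== SOURCE B (Python) =====
-- def RightLeftNibble(string):
--     # One pass over the string in 16-char blocks: each block contributes its
--     # first 8 chars to the right list and (if present) its next 8 to the left.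
--     right = []
--     left = []
--     n = len(string)
--     for i in range(0, n, 16):
--         right.append(string[i:i+8])
--         if i + 8 < n:
--             left.append(string[i+8:i+16])
--     return right, left
-- ===== Notes on version B (the rewrite author's own statement) =====
-- stated objective: alternative
-- what changed: Replaces A's two-phase chunk-comprehension plus parity-counter loop by a single pass over the string in 16-char blocks, each block emitting one right chunk and (when present) one left chunk, with no intermediate chunk list and no counter state.
import Mathlib
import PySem

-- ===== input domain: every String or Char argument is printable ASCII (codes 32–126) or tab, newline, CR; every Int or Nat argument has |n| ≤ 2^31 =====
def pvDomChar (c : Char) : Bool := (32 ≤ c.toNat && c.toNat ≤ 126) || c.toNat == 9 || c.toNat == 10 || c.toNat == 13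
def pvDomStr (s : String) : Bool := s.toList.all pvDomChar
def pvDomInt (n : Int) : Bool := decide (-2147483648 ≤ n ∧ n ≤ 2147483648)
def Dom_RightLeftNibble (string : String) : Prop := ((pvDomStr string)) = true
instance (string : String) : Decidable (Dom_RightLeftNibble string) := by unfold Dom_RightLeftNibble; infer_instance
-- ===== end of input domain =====

-- B replaces A's chunk list + parity-counter loop by a single pass in 16-char blocks
-- (each block yields one right chunk and, if present, one left chunk); return value only.

-- ===== PORT A =====
def RightLeftNibble (string : String) : List String × List String :=
  let right_nibble : List String := []
  let left_nibble : List String := []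
  let chunks : List String := (PySem.List.pyRange 0 (PySem.Str.len string) 8).map
      (fun i => PySem.Str.slice string (some i) (some (i + 8)))
  let counter : Int := 0
  let st := chunks.foldl
      (fun (st : List String × List String × Int) item =>
        if PySem.Int.mod st.2.2 2 = 0 then (st.1 ++ [item], st.2.1, st.2.2 + 1)
        else (st.1, st.2.1 ++ [item], st.2.2 + 1))
      (right_nibble, left_nibble, counter)
  (st.1, st.2.1)

-- ===== PORT B =====
def RightLeftNibble_alt (string : String) : List String × List String :=
  let n := PySem.Str.len string
  (PySem.List.pyRange 0 n 16).foldl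
    (fun (st : List String × List String) i =>
      let right := st.1 ++ [PySem.Str.slice string (some i) (some (i + 8))]
      let left := if i + 8 < n then st.2 ++ [PySem.Str.slice string (some (i + 8)) (some (i + 16))]
                  else st.2
      (right, left)) ([], [])

-- ===== PRECONDITION & SPEC =====
def Spec_RightLeftNibble (string : String) (out : List String × List String) : Prop := out = RightLeftNibble_alt string
instance (string : String) (out : List String × List String) : Decidable (Spec_RightLeftNibble string out) := by unfold Spec_RightLeftNibble; infer_instance

-- ===== CLAIM (what is proved, stated in full; the proofs are below) =====
def Claim_equal_RightLeftNibble : Prop := ∀ (string : String), Dom_RightLeftNibble string → Spec_RightLeftNibble string (RightLeftNibble string)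

-- ===== LEMMAS AND PROOFS =====

-- range(a, b, s) with positive step: cons / nil forms
theorem pyRange_pos_nil (a b s : Int) (hs : 0 < s) (h : b ≤ a) :
    PySem.List.pyRange a b s = [] := by
  rw [PySem.List.pyRange_of_pos a b hs, if_neg (by omega)]
  simp

theorem pyRange_pos_cons (a b s : Int) (hs : 0 < s) (h : a < b) :
    PySem.List.pyRange a b s = a :: PySem.List.pyRange (a + s) b s := by
  rw [PySem.List.pyRange_of_pos a b hs, PySem.List.pyRange_of_pos (a + s) b hs]
  by_cases h2 : a + s < b
  · rw [if_pos h, if_pos h2]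
    have hdiv : (b - a + s - 1) / s = (b - (a + s) + s - 1) / s + 1 := by
      have he : b - a + s - 1 = (b - (a + s) + s - 1) + 1 * s := by ring
      rw [he, Int.add_mul_ediv_right _ _ (by omega)]
    have hN : ((b - a + s - 1) / s).toNat = ((b - (a + s) + s - 1) / s).toNat + 1 := by
      have h0 : 0 ≤ (b - (a + s) + s - 1) / s := Int.ediv_nonneg (by omega) (by omega)
      omega
    rw [hN, List.range_succ_eq_map]
    simp only [List.map_cons, List.map_map]
    congr 1
    · simp
    · congr 1
      funext k
      simp [Function.comp]
      ring
  · rw [if_pos h, if_neg h2]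
    have hq : (b - a + s - 1) / s = 1 := by
      have he : b - a + s - 1 = (b - a - 1) + 1 * s := by ring
      rw [he, Int.add_mul_ediv_right _ _ (by omega : s ≠ 0)]
      have h0 : (b - a - 1) / s = 0 := Int.ediv_eq_zero_of_lt (by omega) (by omega)
      omega
    rw [hq]
    simp

-- per-8 chunk list of a char list (what A's comprehension builds)
def chunkList (cs : List Char) : List String :=
  if cs = [] then []
  else String.ofList (cs.take 8) :: chunkList (cs.drop 8)
termination_by cs.length
decreasing_by
  rename_i h
  have hp : 0 < cs.length := List.length_pos_iff.mpr (by simpa using h)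
  simp
  omega

-- alternate a list into (even positions, odd positions)
def distribute : List String → List String × List String
  | [] => ([], [])
  | x :: xs => ((x :: (distribute xs).2, (distribute xs).1) : List String × List String)

-- xs[a:a+k] for 0 ≤ a, 0 ≤ k
theorem sliceTake (cs : List Char) (a k : Int) (ha : 0 ≤ a) (hk : 0 ≤ k) :
    PySem.List.slice cs (some a) (some (a + k)) = (cs.drop a.toNat).take k.toNat := by
  rw [PySem.List.slice_toNat cs ha (by omega)]
  congr 1
  omega

theorem chunkList_nil : chunkList [] = [] := by rw [chunkList]; simp

-- A's chunk comprehension, from index a on, is chunkList of the dropped list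
theorem mapChunks (cs : List Char) :
    ∀ (k : Nat) (a : Int), 0 ≤ a → cs.length - a.toNat ≤ k →
      (PySem.List.pyRange a (cs.length : Int) 8).map
        (fun i => String.ofList (PySem.List.slice cs (some i) (some (i + 8))))
      = chunkList (cs.drop a.toNat) := by
  intro k
  induction k with
  | zero =>
    intro a ha hle
    rw [pyRange_pos_nil _ _ _ (by norm_num) (by omega), List.drop_eq_nil_of_le (by omega),
      chunkList_nil]
    simp
  | succ k ih =>
    intro a ha hle
    by_cases hab : a < (cs.length : Int)
    · have hne : cs.drop a.toNat ≠ [] := by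
        intro hc
        have := congrArg List.length hc
        simp at this
        omega
      rw [pyRange_pos_cons _ _ _ (by norm_num) hab, List.map_cons,
        sliceTake cs a 8 ha (by norm_num), show Int.toNat 8 = 8 from rfl]
      rw [chunkList, if_neg hne]
      congr 1
      rw [ih (a + 8) (by omega) (by omega)]
      congr 1
      rw [List.drop_drop]
      congr 1
      omega
    · rw [pyRange_pos_nil _ _ _ (by norm_num) (by omega), List.drop_eq_nil_of_le (by omega),
        chunkList_nil]
      simp

-- A's parity-counter loop distributes the chunks by the parity of the counter
theorem foldA (xs : List String) :
    ∀ (r l : List String) (c : Int),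
      xs.foldl
        (fun (st : List String × List String × Int) item =>
          if PySem.Int.mod st.2.2 2 = 0 then (st.1 ++ [item], st.2.1, st.2.2 + 1)
          else (st.1, st.2.1 ++ [item], st.2.2 + 1)) (r, l, c)
      = if PySem.Int.mod c 2 = 0 then
          (r ++ (distribute xs).1, l ++ (distribute xs).2, c + xs.length)
        else
          (r ++ (distribute xs).2, l ++ (distribute xs).1, c + xs.length) := by
  induction xs with
  | nil => intro r l c; simp [distribute]
  | cons x xs ih =>
    intro r l c
    have hm : PySem.Int.mod c 2 = c % 2 := PySem.Int.mod_eq_emod_of_pos (by norm_num)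
    have hm1 : PySem.Int.mod (c + 1) 2 = (c + 1) % 2 := PySem.Int.mod_eq_emod_of_pos (by norm_num)
    simp only [List.foldl_cons, distribute]
    by_cases hc : PySem.Int.mod c 2 = 0
    · rw [if_pos hc]
      rw [ih (r ++ [x]) l (c + 1), if_neg (by omega), if_pos hc]
      simp only [Prod.mk.injEq]
      refine ⟨by simp, by simp, ?_⟩
      simp only [List.length_cons]
      push_cast
      ring
    · rw [if_neg hc]
      rw [ih r (l ++ [x]) (c + 1), if_pos (by omega), if_neg hc]
      simp only [Prod.mk.injEq]
      refine ⟨by simp, by simp, ?_⟩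
      simp only [List.length_cons]
      push_cast
      ring

-- one 16-block of the distributed chunk list
theorem distribute_chunk (ds : List Char) (h : ds ≠ []) :
    distribute (chunkList ds)
      = (String.ofList (ds.take 8) :: (distribute (chunkList (ds.drop 16))).1,
         if 8 < ds.length then
           String.ofList ((ds.drop 8).take 8) :: (distribute (chunkList (ds.drop 16))).2
         else (distribute (chunkList (ds.drop 16))).2) := by
  conv_lhs => rw [chunkList]
  rw [if_neg h]
  have h16 : ds.drop 16 = (ds.drop 8).drop 8 := by rw [List.drop_drop]
  by_cases hd : ds.drop 8 = []
  · have hlen : ds.length ≤ 8 := by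
      have := congrArg List.length hd
      simp at this
      omega
    rw [h16, hd, chunkList_nil, if_neg (by omega)]
    simp [distribute, chunkList_nil]
  · have hlen : 8 < ds.length := by
      have := List.length_pos_iff.mpr hd
      simp at this
      omega
    rw [h16, if_pos hlen]
    conv_lhs => rw [chunkList]
    rw [if_neg hd]
    simp [distribute]

-- B's 16-stride loop computes the same distribution directly
theorem B_inv (cs : List Char) :
    ∀ (k : Nat) (a : Int) (r l : List String), 0 ≤ a → cs.length - a.toNat ≤ k →
      (PySem.List.pyRange a (cs.length : Int) 16).foldl
        (fun (st : List String × List String) i =>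
          (st.1 ++ [String.ofList (PySem.List.slice cs (some i) (some (i + 8)))],
           if i + 8 < (cs.length : Int) then
             st.2 ++ [String.ofList (PySem.List.slice cs (some (i + 8)) (some (i + 16)))]
           else st.2)) (r, l)
      = (r ++ (distribute (chunkList (cs.drop a.toNat))).1,
         l ++ (distribute (chunkList (cs.drop a.toNat))).2) := by
  intro k
  induction k with
  | zero =>
    intro a r l ha hle
    rw [pyRange_pos_nil _ _ _ (by norm_num) (by omega), List.drop_eq_nil_of_le (by omega),
      chunkList_nil]
    simp [distribute]
  | succ k ih =>
    intro a r l ha hle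
    by_cases hab : a < (cs.length : Int)
    · rw [pyRange_pos_cons _ _ _ (by norm_num) hab, List.foldl_cons]
      have hne : cs.drop a.toNat ≠ [] := by
        intro hc
        have := congrArg List.length hc
        simp at this
        omega
      have hdlen : (cs.drop a.toNat).length = cs.length - a.toNat := by simp
      have hs1 : PySem.List.slice cs (some a) (some (a + 8))
          = (cs.drop a.toNat).take 8 := by
        rw [sliceTake cs a 8 ha (by norm_num), show Int.toNat 8 = 8 from rfl]
      have hs2 : PySem.List.slice cs (some (a + 8)) (some (a + 16))
          = ((cs.drop a.toNat).drop 8).take 8 := by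
        have h88 : a + 16 = (a + 8) + 8 := by ring
        rw [h88, sliceTake cs (a + 8) 8 (by omega) (by norm_num),
          show Int.toNat 8 = 8 from rfl, List.drop_drop]
        congr 1
        congr 1
        omega
      have hcond : (a + 8 < (cs.length : Int)) ↔ (8 < (cs.drop a.toNat).length) := by
        rw [hdlen]
        omega
      have hd16 : cs.drop (a + 16).toNat = (cs.drop a.toNat).drop 16 := by
        rw [List.drop_drop]
        congr 1
        omega
      rw [ih (a + 16) _ _ (by omega) (by omega), hd16, distribute_chunk _ hne, hs1, hs2]
      by_cases hc : a + 8 < (cs.length : Int)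
      · rw [if_pos hc, if_pos (hcond.mp hc)]
        simp
      · rw [if_neg hc, if_neg (fun hx => hc (hcond.mpr hx))]
        simp
    · rw [pyRange_pos_nil _ _ _ (by norm_num) (by omega), List.drop_eq_nil_of_le (by omega),
        chunkList_nil]
      simp [distribute]

-- ===== VERDICT (by name: the statement is the Claim_ definition above) =====
theorem RightLeftNibble_spec : Claim_equal_RightLeftNibble := by
  intro s _
  unfold Spec_RightLeftNibble RightLeftNibble RightLeftNibble_alt
  simp only [PySem.Str.slice, PySem.Chars.slice_eq_listSlice, PySem.Str.len]
  rw [mapChunks s.toList (s.toList.length) 0 le_rfl (by simp), foldA,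
    B_inv s.toList (s.toList.length) 0 [] [] le_rfl (by simp)]
  rw [if_pos (by simp [PySem.Int.mod])]
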